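-- pv_equiv track=rewrite | github.com/Ayush-23479/Programming-Street-150 | PS-Sprint-2-Soln/Checking_Anagram_Pairs_List_Strings.py | checking_anagram_pairs
-- ===== SOURCE A (Python) =====
-- def checking_anagram_pairs(list_of_strings):
--     anagram_pairs = []
--     n = len(list_of_strings)
--     for i in range(n):
--         for j in range(i + 1, n):
--             if sorted(list_of_strings[i]) == sorted(list_of_strings[j]):
--                 anagram_pairs.append((list_of_strings[i], list_of_strings[j]))
--     return anagram_pairs
-- ===== SOURCE B (Python) =====
-- def checking_anagram_pairs(list_of_strings):
--     # Group indices by sorted-character signature, then emit each index's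
--     # later group-mates: O(n*k log k + P) instead of O(n^2 * k log k).
--     sigs = [''.join(sorted(s)) for s in list_of_strings]
--     groups = {}
--     for idx, sig in enumerate(sigs):
--         groups.setdefault(sig, []).append(idx)
--     pairs = []
--     for i, sig in enumerate(sigs):
--         for j in groups[sig]:
--             if j > i:
--                 pairs.append((list_of_strings[i], list_of_strings[j]))
--     return pairs
-- ===== Notes on version B (the rewrite author's own statement) =====
-- stated objective: faster
-- what changed: B sorts each string once to a signature and groups indices by signature in a dict, emitting each index's later group-mates, instead of A's nested scan that re-sorts both strings for every pair.
import Mathlib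
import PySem

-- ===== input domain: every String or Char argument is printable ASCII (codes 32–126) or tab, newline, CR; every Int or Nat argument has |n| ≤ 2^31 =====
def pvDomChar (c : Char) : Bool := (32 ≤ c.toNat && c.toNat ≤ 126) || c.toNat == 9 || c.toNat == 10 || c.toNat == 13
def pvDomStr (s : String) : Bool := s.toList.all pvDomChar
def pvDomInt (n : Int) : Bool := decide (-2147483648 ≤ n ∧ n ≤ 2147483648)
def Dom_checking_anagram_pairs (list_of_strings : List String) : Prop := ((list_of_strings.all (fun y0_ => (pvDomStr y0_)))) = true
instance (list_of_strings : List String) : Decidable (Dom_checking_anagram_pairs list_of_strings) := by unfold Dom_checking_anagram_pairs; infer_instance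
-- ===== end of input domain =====

-- B groups indices by a once-computed sorted-character signature instead of A's
-- nested scan that re-sorts both strings for every pair (objective: faster).

-- ===== PORT A =====
def checking_anagram_pairs (list_of_strings : List String) : List (String × String) :=
  let n : Int := PySem.List.len list_of_strings
  (PySem.List.pyRange 0 n).foldl (fun acc i =>
    (PySem.List.pyRange (i + 1) n).foldl (fun acc2 j =>
      if PySem.List.sorted (PySem.List.pyGetD list_of_strings i "").toList id ==
         PySem.List.sorted (PySem.List.pyGetD list_of_strings j "").toList id then
        acc2 ++ [(PySem.List.pyGetD list_of_strings i "",
                  PySem.List.pyGetD list_of_strings j "")]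
      else acc2) acc) []

-- ===== PORT B =====
-- ''.join(sorted(s))
def pvSig (s : String) : String := String.ofList (PySem.List.sorted s.toList id)

def checking_anagram_pairs_alt (list_of_strings : List String) : List (String × String) :=
  let sigs : List String := list_of_strings.map pvSig
  let groups : PySem.Dict String (List Int) :=
    (PySem.List.enumerate sigs).foldl
      (fun d p => d.insert p.2 (d.getD p.2 [] ++ [p.1])) PySem.Dict.empty
  (PySem.List.enumerate sigs).foldl (fun acc p =>
    (groups.getD p.2 []).foldl (fun acc2 j =>
      if p.1 < j then
        acc2 ++ [(PySem.List.pyGetD list_of_strings p.1 "",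
                  PySem.List.pyGetD list_of_strings j "")]
      else acc2) acc) []

-- ===== PRECONDITION & SPEC =====
def Spec_checking_anagram_pairs (list_of_strings : List String) (out : List (String × String)) : Prop := out = checking_anagram_pairs_alt list_of_strings
instance (list_of_strings : List String) (out : List (String × String)) : Decidable (Spec_checking_anagram_pairs list_of_strings out) := by unfold Spec_checking_anagram_pairs; infer_instance

-- ===== CLAIM (what is proved, stated in full; the proofs are below) =====
def Claim_equal_checking_anagram_pairs : Prop := ∀ (list_of_strings : List String), Dom_checking_anagram_pairs list_of_strings → Spec_checking_anagram_pairs list_of_strings (checking_anagram_pairs list_of_strings)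

-- ===== LEMMAS AND PROOFS =====

-- invariant of B's grouping loop: the value stored at key s is the list of the
-- first components of the pairs of the processed prefix whose second component is s
lemma pvBuild_getD (l : List (Int × String)) (d : PySem.Dict String (List Int)) (s : String) :
    (l.foldl (fun d p => d.insert p.2 (d.getD p.2 [] ++ [p.1])) d).getD s []
      = d.getD s [] ++ (l.filter (fun p => p.2 == s)).map (·.1) := by
  induction l generalizing d with
  | nil => simp
  | cons p t ih =>
    simp only [List.foldl_cons, ih, List.filter_cons]
    by_cases h : p.2 == s
    · have hs : p.2 = s := by simpa using h
      simp [hs, PySem.Dict.getD_insert_self]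
    · have hs : s ≠ p.2 := by intro e; exact h (by simp [e])
      simp [h, PySem.Dict.getD_insert_of_ne _ _ _ hs]

-- Prop-conditioned variant of PySem.List.foldl_append_if
lemma pvFoldl_append_if_prop {α β : Type} (p : α → Prop) [DecidablePred p]
    (f : α → β) (l : List α) (acc : List β) :
    l.foldl (fun acc x => if p x then acc ++ [f x] else acc) acc
      = acc ++ (l.filter (fun x => decide (p x))).map f := by
  have h := PySem.List.foldl_append_if (fun x => decide (p x)) f l acc
  simpa using h

lemma pvGetD_empty (s : String) :
    (PySem.Dict.empty : PySem.Dict String (List Int)).getD s [] = [] := by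
  simp [PySem.Dict.empty, PySem.Dict.getD, PySem.Dict.get?]

lemma pvSig_eq_iff (a b : String) :
    (pvSig a == pvSig b) =
      (PySem.List.sorted a.toList id == PySem.List.sorted b.toList id) := by
  by_cases h : PySem.List.sorted a.toList id = PySem.List.sorted b.toList id
  · simp [pvSig, h]
  · have hne : String.ofList (PySem.List.sorted a.toList id) ≠
        String.ofList (PySem.List.sorted b.toList id) := by
      intro e; exact h (by simpa using congrArg String.toList e)
    simp [pvSig, h, hne]

lemma pvSigat (xs : List String) (j : Int) :
    PySem.List.pyGetD (xs.map pvSig) j "" = pvSig (PySem.List.pyGetD xs j "") := by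
  have h := PySem.List.pyGetD_map pvSig xs j ""
  rwa [show pvSig "" = "" from rfl] at h

theorem checking_anagram_pairs_spec : Claim_equal_checking_anagram_pairs := by
  intro xs _
  unfold Spec_checking_anagram_pairs
  have hA : checking_anagram_pairs xs
      = (PySem.List.pyRange 0 (PySem.List.len xs)).flatMap (fun i =>
          ((PySem.List.pyRange (i + 1) (PySem.List.len xs)).filter (fun j =>
              PySem.List.sorted (PySem.List.pyGetD xs i "").toList id ==
              PySem.List.sorted (PySem.List.pyGetD xs j "").toList id)).map (fun j =>
            (PySem.List.pyGetD xs i "", PySem.List.pyGetD xs j ""))) := by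
    simp only [checking_anagram_pairs]
    simp only [PySem.List.foldl_append_if, PySem.List.foldl_append_eq_flatMap,
      List.nil_append]
  have hB : checking_anagram_pairs_alt xs
      = (PySem.List.pyRange 0 (PySem.List.len xs)).flatMap (fun i =>
          ((((PySem.List.pyRange 0 (PySem.List.len xs)).filter (fun j =>
                PySem.List.pyGetD (xs.map pvSig) j "" == PySem.List.pyGetD (xs.map pvSig) i "")).filter
              (fun j => decide (i < j))).map (fun j =>
            (PySem.List.pyGetD xs i "", PySem.List.pyGetD xs j "")))) := by
    simp only [checking_anagram_pairs_alt]
    simp only [pvFoldl_append_if_prop, pvBuild_getD, pvGetD_empty,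
      PySem.List.foldl_append_eq_flatMap, List.nil_append]
    rw [PySem.List.enumerate_eq_map_pyRange (xs.map pvSig) ""]
    simp [List.flatMap_map, List.filter_map, List.map_map, Function.comp_def]
  rw [hA, hB]
  apply List.flatMap_congr
  intro i hi
  obtain ⟨h0, hin⟩ := PySem.List.mem_pyRange_one.mp hi
  rw [List.filter_filter]
  rw [PySem.List.pyRange_one_append 0 (i + 1) (PySem.List.len xs) (by omega) (by omega),
    List.filter_append]
  have h1 : (PySem.List.pyRange 0 (i + 1)).filter
      (fun j => decide (i < j) &&
        (PySem.List.pyGetD (xs.map pvSig) j "" == PySem.List.pyGetD (xs.map pvSig) i "")) = [] := by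
    apply List.filter_eq_nil_iff.mpr
    intro j hj
    have := PySem.List.mem_pyRange_one.mp hj
    simp only [Bool.and_eq_true, decide_eq_true_eq]
    rintro ⟨hlt, -⟩
    omega
  rw [h1, List.nil_append]
  refine congrArg _ ?_
  apply List.filter_congr
  intro j hj
  have hji := PySem.List.mem_pyRange_one.mp hj
  have hd : decide (i < j) = true := by simp; omega
  rw [hd, Bool.true_and, pvSigat, pvSigat, pvSig_eq_iff, Bool.beq_comm]
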